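-- pv_equiv track=rewrite | github.com/peutch/opensourcegames | code/generate_static_website.py | shortcut_url
-- ===== SOURCE A (Python) =====
-- def shortcut_url(url):
--
--     # gitlab
--     gl_prefix = 'https://gitlab.com/'
--     if url.startswith(gl_prefix):
--         return 'GL: ' + url[len(gl_prefix):]
--     # github
--     gh_prefix = 'https://github.com/'
--     if url.startswith(gh_prefix):
--         return 'GH: ' + url[len(gh_prefix):]
--
--     # sourceforge
--     sf_prefix = 'https://sourceforge.net/projects/'
--     if url.startswith(sf_prefix):
--         return 'SF: ' + url[len(sf_prefix):]
--
--     # archive link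
--     ia_prefix = 'https://web.archive.org/web/'
--     if url.startswith(ia_prefix):
--         return 'Archive: ' + url[len(ia_prefix):]
--
--     # Wikipedia link
--     wp_prefix = 'https://en.wikipedia.org/wiki/'
--     if url.startswith(wp_prefix):
--         return 'WP: ' + url[len(wp_prefix):]
--
--     # cutoff common prefixes
--     for prefix in ('http://', 'https://'):
--         if url.startswith(prefix):
--             return url[len(prefix):]
--     # as is
--     return url
-- ===== SOURCE B (Python) =====
-- _HOSTS = {
--     'gitlab.com': ('GL: ', ''),
--     'github.com': ('GH: ', ''),
--     'sourceforge.net': ('SF: ', 'projects/'),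
--     'web.archive.org': ('Archive: ', 'web/'),
--     'en.wikipedia.org': ('WP: ', 'wiki/'),
-- }
--
-- def shortcut_url(url):
--     # Parse the URL instead of trying prefixes one by one: strip the scheme,
--     # split host from path, and dispatch on the host through a dict.
--     if url.startswith('https://'):
--         rest = url[len('https://'):]
--         host, sep, path = rest.partition('/')
--         entry = _HOSTS.get(host)
--         if sep and entry is not None:
--             label, required = entry
--             if path.startswith(required):
--                 return label + path[len(required):]
--         return rest
--     if url.startswith('http://'):
--         return url[len('http://'):]
--     return url
-- ===== Notes on version B (the rewrite author's own statement) =====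
-- stated objective: alternative
-- what changed: B parses the URL instead of testing whole prefixes: it strips the scheme, partitions the remainder into host and path at the first '/', and dispatches on the host through a dict of (label, required path prefix) entries.
import Mathlib
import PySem

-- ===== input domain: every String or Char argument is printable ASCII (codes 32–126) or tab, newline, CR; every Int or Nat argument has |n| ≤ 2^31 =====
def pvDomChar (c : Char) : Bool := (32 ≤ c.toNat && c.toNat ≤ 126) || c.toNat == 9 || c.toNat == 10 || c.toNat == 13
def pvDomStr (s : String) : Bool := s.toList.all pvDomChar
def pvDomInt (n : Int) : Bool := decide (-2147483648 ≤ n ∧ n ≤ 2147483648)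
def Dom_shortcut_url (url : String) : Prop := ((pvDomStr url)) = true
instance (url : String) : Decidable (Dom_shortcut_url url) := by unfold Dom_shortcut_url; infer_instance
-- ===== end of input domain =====

-- B parses the URL (strip scheme, partition host from path at the first '/', dict dispatch on the host) instead of A's chain of whole-prefix tests; same return value on every string.


-- ===== PORT A =====
-- the final  for prefix in ('http://', 'https://'):  loop of A
def shortcutCommonLoop (prefixes : List String) (url : String) : String :=
  match prefixes with
  | [] => url
  | p :: rest =>
      if PySem.Str.startswith url p then PySem.Str.slice url (some (PySem.Str.len p : Int)) none
      else shortcutCommonLoop rest url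

def shortcut_url (url : String) : String :=
  if PySem.Str.startswith url "https://gitlab.com/" then
    "GL: " ++ PySem.Str.slice url (some (PySem.Str.len "https://gitlab.com/" : Int)) none
  else if PySem.Str.startswith url "https://github.com/" then
    "GH: " ++ PySem.Str.slice url (some (PySem.Str.len "https://github.com/" : Int)) none
  else if PySem.Str.startswith url "https://sourceforge.net/projects/" then
    "SF: " ++ PySem.Str.slice url (some (PySem.Str.len "https://sourceforge.net/projects/" : Int)) none
  else if PySem.Str.startswith url "https://web.archive.org/web/" then
    "Archive: " ++ PySem.Str.slice url (some (PySem.Str.len "https://web.archive.org/web/" : Int)) none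
  else if PySem.Str.startswith url "https://en.wikipedia.org/wiki/" then
    "WP: " ++ PySem.Str.slice url (some (PySem.Str.len "https://en.wikipedia.org/wiki/" : Int)) none
  else
    shortcutCommonLoop ["http://", "https://"] url

-- ===== PORT B =====
-- the module-level _HOSTS dict: host -> (label, required path prefix)
def pvHosts : PySem.Dict String (String × String) :=
  PySem.Dict.ofList
    [("gitlab.com", ("GL: ", "")),
     ("github.com", ("GH: ", "")),
     ("sourceforge.net", ("SF: ", "projects/")),
     ("web.archive.org", ("Archive: ", "web/")),
     ("en.wikipedia.org", ("WP: ", "wiki/"))]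

-- s.partition('/'), ported by hand (exact: first occurrence of the length-1 separator, or (s, '', ''))
def pvPartitionSlash (s : String) : String × String × String :=
  let i := PySem.Str.find s "/"
  if i = -1 then (s, "", "")
  else (PySem.Str.slice s none (some i), "/", PySem.Str.slice s (some (i + 1)) none)

def shortcut_url_alt (url : String) : String :=
  if PySem.Str.startswith url "https://" then
    let rest := PySem.Str.slice url (some (PySem.Str.len "https://" : Int)) none
    let hsp := pvPartitionSlash rest
    let entry := PySem.Dict.get? pvHosts hsp.1
    if hsp.2.1 ≠ "" then
      match entry with
      | some (label, required) =>
          if PySem.Str.startswith hsp.2.2 required then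
            label ++ PySem.Str.slice hsp.2.2 (some (PySem.Str.len required : Int)) none
          else rest
      | none => rest
    else rest
  else if PySem.Str.startswith url "http://" then
    PySem.Str.slice url (some (PySem.Str.len "http://" : Int)) none
  else url

-- ===== PRECONDITION & SPEC =====
def Spec_shortcut_url (url : String) (out : String) : Prop := out = shortcut_url_alt url
instance (url : String) (out : String) : Decidable (Spec_shortcut_url url out) := by unfold Spec_shortcut_url; infer_instance

-- ===== CLAIM =====
def Claim_equal_shortcut_url : Prop := ∀ (url : String), Dom_shortcut_url url → Spec_shortcut_url url (shortcut_url url)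

-- ===== LEMMAS AND PROOFS =====

-- A at the level of List Char
def aList (u : List Char) : List Char :=
  if PySem.Chars.startswith u "https://gitlab.com/".toList then "GL: ".toList ++ u.drop 19
  else if PySem.Chars.startswith u "https://github.com/".toList then "GH: ".toList ++ u.drop 19
  else if PySem.Chars.startswith u "https://sourceforge.net/projects/".toList then "SF: ".toList ++ u.drop 33
  else if PySem.Chars.startswith u "https://web.archive.org/web/".toList then "Archive: ".toList ++ u.drop 28
  else if PySem.Chars.startswith u "https://en.wikipedia.org/wiki/".toList then "WP: ".toList ++ u.drop 30
  else if PySem.Chars.startswith u "http://".toList then u.drop 7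
  else if PySem.Chars.startswith u "https://".toList then u.drop 8
  else u

-- B at the level of List Char
def bList (u : List Char) : List Char :=
  if PySem.Chars.startswith u "https://".toList then
    let r := u.drop 8
    let i := PySem.Chars.find r ['/']
    if i = -1 then r
    else
      let host := r.take i.toNat
      let path := r.drop (i.toNat + 1)
      if host = "gitlab.com".toList then "GL: ".toList ++ path
      else if host = "github.com".toList then "GH: ".toList ++ path
      else if host = "sourceforge.net".toList then
        (if PySem.Chars.startswith path "projects/".toList then "SF: ".toList ++ path.drop 9 else r)
      else if host = "web.archive.org".toList then
        (if PySem.Chars.startswith path "web/".toList then "Archive: ".toList ++ path.drop 4 else r)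
      else if host = "en.wikipedia.org".toList then
        (if PySem.Chars.startswith path "wiki/".toList then "WP: ".toList ++ path.drop 5 else r)
      else r
  else if PySem.Chars.startswith u "http://".toList then u.drop 7
  else u

theorem aEq (url : String) : (shortcut_url url).toList = aList url.toList := by
  have l1 : (PySem.Str.len "https://gitlab.com/" : Int) = 19 := by decide
  have l2 : (PySem.Str.len "https://github.com/" : Int) = 19 := by decide
  have l3 : (PySem.Str.len "https://sourceforge.net/projects/" : Int) = 33 := by decide
  have l4 : (PySem.Str.len "https://web.archive.org/web/" : Int) = 28 := by decide
  have l5 : (PySem.Str.len "https://en.wikipedia.org/wiki/" : Int) = 30 := by decide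
  have l6 : (PySem.Str.len "http://" : Int) = 7 := by decide
  have l7 : (PySem.Str.len "https://" : Int) = 8 := by decide
  simp only [shortcut_url, aList, shortcutCommonLoop, l1, l2, l3, l4, l5, l6, l7]
  simp only [apply_ite String.toList, String.toList_append, PySem.Str.startswith_eq,
    PySem.Str.toList_slice, PySem.Chars.slice_eq_listSlice,
    PySem.List.slice_from _ (by norm_num : (0:Int) ≤ 19),
    PySem.List.slice_from _ (by norm_num : (0:Int) ≤ 33),
    PySem.List.slice_from _ (by norm_num : (0:Int) ≤ 28),
    PySem.List.slice_from _ (by norm_num : (0:Int) ≤ 30),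
    PySem.List.slice_from _ (by norm_num : (0:Int) ≤ 7),
    PySem.List.slice_from _ (by norm_num : (0:Int) ≤ 8)]
  rfl

set_option maxHeartbeats 1000000 in
theorem bEq (url : String) : (shortcut_url_alt url).toList = bList url.toList := by
  have l8 : (PySem.Str.len "https://" : Int) = 8 := by decide
  have l7 : (PySem.Str.len "http://" : Int) = 7 := by decide
  have hrest : (PySem.Str.slice url (some (8:Int)) none).toList = url.toList.drop 8 := by
    rw [PySem.Str.toList_slice, PySem.Chars.slice_eq_listSlice,
        PySem.List.slice_from _ (by norm_num : (0:Int) ≤ 8)]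
    rfl
  have hslice7 : (PySem.Str.slice url (some (7:Int)) none).toList = url.toList.drop 7 := by
    rw [PySem.Str.toList_slice, PySem.Chars.slice_eq_listSlice,
        PySem.List.slice_from _ (by norm_num : (0:Int) ≤ 7)]
    rfl
  unfold shortcut_url_alt pvPartitionSlash bList
  rw [l8, l7]
  simp only [PySem.Str.startswith_eq, PySem.Str.find_eq, hrest]
  by_cases hs : PySem.Chars.startswith url.toList "https://".toList = true
  · simp only [hs, if_true]
    by_cases hi : PySem.Chars.find (url.toList.drop 8) ['/'] = -1
    · simp [hi, hrest]
    · have h0 : 0 ≤ (PySem.Chars.find (url.toList.drop 8) ['/']) := by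
        have := PySem.Chars.neg_one_le_find (url.toList.drop 8) ['/']
        omega
      have hhost : (PySem.Str.slice (PySem.Str.slice url (some (8:Int)) none) none (some (PySem.Chars.find (url.toList.drop 8) ['/']))).toList = (url.toList.drop 8).take (PySem.Chars.find (url.toList.drop 8) ['/']).toNat := by
        rw [PySem.Str.toList_slice, PySem.Chars.slice_eq_listSlice, hrest,
            PySem.List.slice_to _ h0]
      have hpath : (PySem.Str.slice (PySem.Str.slice url (some (8:Int)) none) (some ((PySem.Chars.find (url.toList.drop 8) ['/']) + 1)) none).toList = (url.toList.drop 8).drop ((PySem.Chars.find (url.toList.drop 8) ['/']).toNat + 1) := by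
        rw [PySem.Str.toList_slice, PySem.Chars.slice_eq_listSlice, hrest,
            PySem.List.slice_from _ (by omega), (by omega : ((PySem.Chars.find (url.toList.drop 8) ['/']) + 1).toNat = (PySem.Chars.find (url.toList.drop 8) ['/']).toNat + 1)]
      have hnil : ∀ x : List Char, PySem.Chars.startswith x [] = true := by
        intro x
        simp [PySem.Chars.startswith]
      have hget : ∀ x : String, pvHosts.get? x =
          if "gitlab.com" == x then some ("GL: ", "")
          else if "github.com" == x then some ("GH: ", "")
          else if "sourceforge.net" == x then some ("SF: ", "projects/")
          else if "web.archive.org" == x then some ("Archive: ", "web/")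
          else if "en.wikipedia.org" == x then some ("WP: ", "wiki/")
          else none := by
        intro x
        by_cases x1 : "gitlab.com" = x
        · subst x1; decide
        · by_cases x2 : "github.com" = x
          · subst x2; decide
          · by_cases x3 : "sourceforge.net" = x
            · subst x3; decide
            · by_cases x4 : "web.archive.org" = x
              · subst x4; decide
              · by_cases x5 : "en.wikipedia.org" = x
                · subst x5; decide
                · rw [(by rfl : pvHosts = PySem.Dict.mk
                    [("gitlab.com", ("GL: ", "")),
                     ("github.com", ("GH: ", "")),
                     ("sourceforge.net", ("SF: ", "projects/")),
                     ("web.archive.org", ("Archive: ", "web/")),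
                     ("en.wikipedia.org", ("WP: ", "wiki/"))])]
                  have b1 : ("gitlab.com" == x) = false := beq_eq_false_iff_ne.mpr x1
                  have b2 : ("github.com" == x) = false := beq_eq_false_iff_ne.mpr x2
                  have b3 : ("sourceforge.net" == x) = false := beq_eq_false_iff_ne.mpr x3
                  have b4 : ("web.archive.org" == x) = false := beq_eq_false_iff_ne.mpr x4
                  have b5 : ("en.wikipedia.org" == x) = false := beq_eq_false_iff_ne.mpr x5
                  simp [PySem.Dict.get?, List.find?, b1, b2, b3, b4, b5]
      by_cases hg1 : (url.toList.drop 8).take (PySem.Chars.find (url.toList.drop 8) ['/']).toNat = "gitlab.com".toList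
      · have heq1 : (PySem.Str.slice (PySem.Str.slice url (some (8:Int)) none) none (some (PySem.Chars.find (url.toList.drop 8) ['/']))) = "gitlab.com" := String.toList_inj.mp (hhost.trans hg1)
        have hp1r : (PySem.Str.slice (PySem.Str.slice (PySem.Str.slice url (some (8:Int)) none) (some ((PySem.Chars.find (url.toList.drop 8) ['/']) + 1)) none) (some (0:Int)) none).toList
            = ((url.toList.drop 8).drop ((PySem.Chars.find (url.toList.drop 8) ['/']).toNat + 1)).drop 0 := by
          rw [PySem.Str.toList_slice, PySem.Chars.slice_eq_listSlice, hpath,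
              PySem.List.slice_from _ (by norm_num)]
          simp
        simp [hget, hi, hg1, heq1, hp1r, hpath, hnil, String.toList_append, List.drop_drop]
      · have hne1 : ¬("gitlab.com" = (PySem.Str.slice (PySem.Str.slice url (some (8:Int)) none) none (some (PySem.Chars.find (url.toList.drop 8) ['/'])))) :=
          fun h => hg1 (hhost.symm.trans (congrArg String.toList h.symm))
        by_cases hg2 : (url.toList.drop 8).take (PySem.Chars.find (url.toList.drop 8) ['/']).toNat = "github.com".toList
        · have heq2 : (PySem.Str.slice (PySem.Str.slice url (some (8:Int)) none) none (some (PySem.Chars.find (url.toList.drop 8) ['/']))) = "github.com" := String.toList_inj.mp (hhost.trans hg2)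
          have hp2r : (PySem.Str.slice (PySem.Str.slice (PySem.Str.slice url (some (8:Int)) none) (some ((PySem.Chars.find (url.toList.drop 8) ['/']) + 1)) none) (some (0:Int)) none).toList
              = ((url.toList.drop 8).drop ((PySem.Chars.find (url.toList.drop 8) ['/']).toNat + 1)).drop 0 := by
            rw [PySem.Str.toList_slice, PySem.Chars.slice_eq_listSlice, hpath,
                PySem.List.slice_from _ (by norm_num)]
            simp
          simp [hget, hi, hg2, heq2, hp2r, hpath, hnil, String.toList_append, List.drop_drop]
        · have hne2 : ¬("github.com" = (PySem.Str.slice (PySem.Str.slice url (some (8:Int)) none) none (some (PySem.Chars.find (url.toList.drop 8) ['/'])))) :=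
            fun h => hg2 (hhost.symm.trans (congrArg String.toList h.symm))
          by_cases hg3 : (url.toList.drop 8).take (PySem.Chars.find (url.toList.drop 8) ['/']).toNat = "sourceforge.net".toList
          · have heq3 : (PySem.Str.slice (PySem.Str.slice url (some (8:Int)) none) none (some (PySem.Chars.find (url.toList.drop 8) ['/']))) = "sourceforge.net" := String.toList_inj.mp (hhost.trans hg3)
            have hp3r : (PySem.Str.slice (PySem.Str.slice (PySem.Str.slice url (some (8:Int)) none) (some ((PySem.Chars.find (url.toList.drop 8) ['/']) + 1)) none) (some (9:Int)) none).toList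
                = ((url.toList.drop 8).drop ((PySem.Chars.find (url.toList.drop 8) ['/']).toNat + 1)).drop 9 := by
              rw [PySem.Str.toList_slice, PySem.Chars.slice_eq_listSlice, hpath,
                  PySem.List.slice_from _ (by norm_num)]
              simp
            simp [hget, hi, hg3, heq3, hp3r, hpath, hrest, String.toList_append, List.drop_drop, apply_ite String.toList]
          · have hne3 : ¬("sourceforge.net" = (PySem.Str.slice (PySem.Str.slice url (some (8:Int)) none) none (some (PySem.Chars.find (url.toList.drop 8) ['/'])))) :=
              fun h => hg3 (hhost.symm.trans (congrArg String.toList h.symm))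
            by_cases hg4 : (url.toList.drop 8).take (PySem.Chars.find (url.toList.drop 8) ['/']).toNat = "web.archive.org".toList
            · have heq4 : (PySem.Str.slice (PySem.Str.slice url (some (8:Int)) none) none (some (PySem.Chars.find (url.toList.drop 8) ['/']))) = "web.archive.org" := String.toList_inj.mp (hhost.trans hg4)
              have hp4r : (PySem.Str.slice (PySem.Str.slice (PySem.Str.slice url (some (8:Int)) none) (some ((PySem.Chars.find (url.toList.drop 8) ['/']) + 1)) none) (some (4:Int)) none).toList
                  = ((url.toList.drop 8).drop ((PySem.Chars.find (url.toList.drop 8) ['/']).toNat + 1)).drop 4 := by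
                rw [PySem.Str.toList_slice, PySem.Chars.slice_eq_listSlice, hpath,
                    PySem.List.slice_from _ (by norm_num)]
                simp
              simp [hget, hi, hg4, heq4, hp4r, hpath, hrest, String.toList_append, List.drop_drop, apply_ite String.toList]
            · have hne4 : ¬("web.archive.org" = (PySem.Str.slice (PySem.Str.slice url (some (8:Int)) none) none (some (PySem.Chars.find (url.toList.drop 8) ['/'])))) :=
                fun h => hg4 (hhost.symm.trans (congrArg String.toList h.symm))
              by_cases hg5 : (url.toList.drop 8).take (PySem.Chars.find (url.toList.drop 8) ['/']).toNat = "en.wikipedia.org".toList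
              · have heq5 : (PySem.Str.slice (PySem.Str.slice url (some (8:Int)) none) none (some (PySem.Chars.find (url.toList.drop 8) ['/']))) = "en.wikipedia.org" := String.toList_inj.mp (hhost.trans hg5)
                have hp5r : (PySem.Str.slice (PySem.Str.slice (PySem.Str.slice url (some (8:Int)) none) (some ((PySem.Chars.find (url.toList.drop 8) ['/']) + 1)) none) (some (5:Int)) none).toList
                    = ((url.toList.drop 8).drop ((PySem.Chars.find (url.toList.drop 8) ['/']).toNat + 1)).drop 5 := by
                  rw [PySem.Str.toList_slice, PySem.Chars.slice_eq_listSlice, hpath,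
                      PySem.List.slice_from _ (by norm_num)]
                  simp
                simp [hget, hi, hg5, heq5, hp5r, hpath, hrest, String.toList_append, List.drop_drop, apply_ite String.toList]
              · have hne5 : ¬("en.wikipedia.org" = (PySem.Str.slice (PySem.Str.slice url (some (8:Int)) none) none (some (PySem.Chars.find (url.toList.drop 8) ['/'])))) :=
                  fun h => hg5 (hhost.symm.trans (congrArg String.toList h.symm))
                have hb1 : ("gitlab.com" == (PySem.Str.slice (PySem.Str.slice url (some (8:Int)) none) none (some (PySem.Chars.find (url.toList.drop 8) ['/'])))) = false := beq_eq_false_iff_ne.mpr hne1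
                have hb2 : ("github.com" == (PySem.Str.slice (PySem.Str.slice url (some (8:Int)) none) none (some (PySem.Chars.find (url.toList.drop 8) ['/'])))) = false := beq_eq_false_iff_ne.mpr hne2
                have hb3 : ("sourceforge.net" == (PySem.Str.slice (PySem.Str.slice url (some (8:Int)) none) none (some (PySem.Chars.find (url.toList.drop 8) ['/'])))) = false := beq_eq_false_iff_ne.mpr hne3
                have hb4 : ("web.archive.org" == (PySem.Str.slice (PySem.Str.slice url (some (8:Int)) none) none (some (PySem.Chars.find (url.toList.drop 8) ['/'])))) = false := beq_eq_false_iff_ne.mpr hne4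
                have hb5 : ("en.wikipedia.org" == (PySem.Str.slice (PySem.Str.slice url (some (8:Int)) none) none (some (PySem.Chars.find (url.toList.drop 8) ['/'])))) = false := beq_eq_false_iff_ne.mpr hne5
                rw [hget]
                simp [hb1, hb2, hb3, hb4, hb5, hi, hrest]
                split_ifs <;> simp_all
  · simp only [hs, if_false, Bool.false_eq_true, apply_ite String.toList, hslice7]

-- first '/' splits: (H ++ '/' :: req) is a prefix of (h ++ '/' :: p) iff h = H and req is a prefix of p,
-- when neither h nor H contains '/'
theorem prefix_host_split (H : List Char) :
    ∀ (h : List Char) (req p : List Char), ('/' : Char) ∉ h → ('/' : Char) ∉ H →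
    ((H ++ '/' :: req <+: h ++ '/' :: p) ↔ (h = H ∧ req <+: p)) := by
  induction H with
  | nil =>
      intro h req p hh _
      cases h with
      | nil => simp
      | cons c h' =>
          simp only [List.nil_append, List.cons_append, List.mem_cons, not_or] at hh ⊢
          constructor
          · intro hpre
            rcases List.cons_prefix_cons.mp hpre with ⟨hc, _⟩
            exact absurd hc hh.1
          · rintro ⟨hfalse, -⟩
            exact absurd (congrArg List.length hfalse) (by simp)
  | cons a H' ih =>
      intro h req p hh hH
      simp only [List.mem_cons, not_or] at hH
      cases h with
      | nil =>
          simp only [List.nil_append, List.cons_append]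
          constructor
          · intro hpre
            rcases List.cons_prefix_cons.mp hpre with ⟨hc, _⟩
            exact absurd hc.symm hH.1
          · rintro ⟨hfalse, -⟩
            exact absurd (congrArg List.length hfalse) (by simp)
      | cons c h' =>
          simp only [List.mem_cons, not_or] at hh
          simp only [List.cons_append, List.cons_prefix_cons, ih h' req p hh.2 hH.2,
            List.cons.injEq]
          constructor
          · rintro ⟨hac, hh', hreq⟩; exact ⟨⟨hac.symm, hh'⟩, hreq⟩
          · rintro ⟨⟨hca, hh'⟩, hreq⟩; exact ⟨hca.symm, hh', hreq⟩

theorem listEq (u : List Char) : aList u = bList u := by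
  by_cases hs : PySem.Chars.startswith u "https://".toList = true
  · obtain ⟨t, ht⟩ := (PySem.Chars.startswith_iff u "https://".toList).mp hs
    subst ht
    have hw : ∀ p : List Char,
        PySem.Chars.startswith ("https://".toList ++ t) ("https://".toList ++ p)
          = PySem.Chars.startswith t p := by
      intro p
      by_cases h : p <+: t
      · rw [(PySem.Chars.startswith_iff _ _).mpr ((List.prefix_append_right_inj _).mpr h),
            (PySem.Chars.startswith_iff _ _).mpr h]
      · rw [Bool.eq_false_iff.mpr
              (fun hh => h ((List.prefix_append_right_inj _).mp ((PySem.Chars.startswith_iff _ _).mp hh))),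
            Bool.eq_false_iff.mpr (fun hh => h ((PySem.Chars.startswith_iff _ _).mp hh))]
    have hhttpF : PySem.Chars.startswith ("https://".toList ++ t) "http://".toList = false := by
      apply Bool.eq_false_iff.mpr
      intro hh
      have hp := List.prefix_iff_eq_take.mp ((PySem.Chars.startswith_iff _ _).mp hh)
      rw [List.take_append] at hp
      simp at hp
    have hsT := hs
    have e19 : ("https://".toList ++ t).drop 19 = t.drop 11 := by
      simpa using List.drop_append (l₁ := "https://".toList) (l₂ := t) (i := 11)
    have e33 : ("https://".toList ++ t).drop 33 = t.drop 25 := by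
      simpa using List.drop_append (l₁ := "https://".toList) (l₂ := t) (i := 25)
    have e28 : ("https://".toList ++ t).drop 28 = t.drop 20 := by
      simpa using List.drop_append (l₁ := "https://".toList) (l₂ := t) (i := 20)
    have e30 : ("https://".toList ++ t).drop 30 = t.drop 22 := by
      simpa using List.drop_append (l₁ := "https://".toList) (l₂ := t) (i := 22)
    have e8 : ("https://".toList ++ t).drop 8 = t := by
      simpa using List.drop_append (l₁ := "https://".toList) (l₂ := t) (i := 0)
    simp only [aList, bList, hsT, if_true]
    rw [(by decide : "https://gitlab.com/".toList = "https://".toList ++ "gitlab.com/".toList),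
        (by decide : "https://github.com/".toList = "https://".toList ++ "github.com/".toList),
        (by decide : "https://sourceforge.net/projects/".toList
          = "https://".toList ++ "sourceforge.net/projects/".toList),
        (by decide : "https://web.archive.org/web/".toList
          = "https://".toList ++ "web.archive.org/web/".toList),
        (by decide : "https://en.wikipedia.org/wiki/".toList
          = "https://".toList ++ "en.wikipedia.org/wiki/".toList),
        hw, hw, hw, hw, hw, hhttpF, e19, e33, e28, e30, e8]
    rw [(by decide : "gitlab.com/".toList = "gitlab.com".toList ++ '/' :: "".toList),
        (by decide : "github.com/".toList = "github.com".toList ++ '/' :: "".toList),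
        (by decide : "sourceforge.net/projects/".toList
          = "sourceforge.net".toList ++ '/' :: "projects/".toList),
        (by decide : "web.archive.org/web/".toList
          = "web.archive.org".toList ++ '/' :: "web/".toList),
        (by decide : "en.wikipedia.org/wiki/".toList
          = "en.wikipedia.org".toList ++ '/' :: "wiki/".toList)]
    by_cases hi : PySem.Chars.find t ['/'] = -1
    · have hnos : ('/':Char) ∉ t := by
        intro hm
        exact absurd ((List.singleton_infix_iff '/' t).mpr hm)
          ((PySem.Chars.find_eq_neg_one_iff t ['/']).mp hi)
      have cf : ∀ (H req : List Char), ('/':Char) ∈ H ++ '/' :: req →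
          PySem.Chars.startswith t (H ++ '/' :: req) = false := by
        intro H req hmem
        exact Bool.eq_false_iff.mpr
          (fun hh => hnos (((PySem.Chars.startswith_iff _ _).mp hh).subset hmem))
      rw [cf _ _ (by decide), cf _ _ (by decide), cf _ _ (by decide),
          cf _ _ (by decide), cf _ _ (by decide)]
      simp [hi]
    · have h0 : 0 ≤ PySem.Chars.find t ['/'] := by
        have := PySem.Chars.neg_one_le_find t ['/']
        omega
      have hle : (PySem.Chars.find t ['/']).toNat ≤ t.length := by
        have := PySem.Chars.find_le_length t ['/']
        omega
      have hsp := PySem.Chars.find_spec (s := t) (sub := ['/']) h0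
      have halen : (t.take ((PySem.Chars.find t ['/']).toNat)).length
          = (PySem.Chars.find t ['/']).toNat := by
        simp [hle]
      have hsplitT : t = t.take ((PySem.Chars.find t ['/']).toNat)
          ++ '/' :: t.drop ((PySem.Chars.find t ['/']).toNat + 1) := by
        obtain ⟨w, hw2⟩ := hsp.1
        have hw3 : t.drop ((PySem.Chars.find t ['/']).toNat + 1) = w := by
          have h4 := congrArg (List.drop 1) hw2
          simpa [List.drop_drop, Nat.add_comm] using h4.symm
        conv_lhs => rw [← List.take_append_drop ((PySem.Chars.find t ['/']).toNat) t]
        rw [hw3, ← hw2]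
        rfl
      have hnosl : ('/':Char) ∉ t.take ((PySem.Chars.find t ['/']).toNat) := by
        intro hm
        obtain ⟨j, hj, hje⟩ := List.mem_take_iff_getElem.mp hm
        have hjlt : j < (PySem.Chars.find t ['/']).toNat := lt_of_lt_of_le hj (by omega)
        have hjlen : j < t.length := lt_of_lt_of_le hjlt hle
        exact hsp.2 j hjlt ⟨t.drop (j+1), by rw [← hje]; simp [(List.drop_eq_getElem_cons hjlen).symm]⟩
      have hcond : ∀ (H req : List Char), ('/':Char) ∉ H →
          (PySem.Chars.startswith t (H ++ '/' :: req) = true ↔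
            (t.take ((PySem.Chars.find t ['/']).toNat) = H ∧
              req <+: t.drop ((PySem.Chars.find t ['/']).toNat + 1))) := by
        intro H req hH
        rw [PySem.Chars.startswith_iff]
        conv_lhs => rw [hsplitT]
        exact prefix_host_split H (t.take ((PySem.Chars.find t ['/']).toNat)) req
          (t.drop ((PySem.Chars.find t ['/']).toNat + 1)) hnosl hH
      simp only [hi, if_false, Bool.false_eq_true]
      by_cases hg1 : t.take ((PySem.Chars.find t ['/']).toNat) = "gitlab.com".toList
      · have hIv : (PySem.Chars.find t ['/']).toNat = 10 := by
          have := halen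
          rw [hg1] at this
          simpa using this.symm
        have c2 : PySem.Chars.startswith t ("github.com".toList ++ '/' :: "".toList) = false :=
          Bool.eq_false_iff.mpr (fun hh =>
            absurd (hg1.symm.trans ((hcond _ _ (by decide)).mp hh).1) (by decide))
        have c3 : PySem.Chars.startswith t ("sourceforge.net".toList ++ '/' :: "projects/".toList) = false :=
          Bool.eq_false_iff.mpr (fun hh =>
            absurd (hg1.symm.trans ((hcond _ _ (by decide)).mp hh).1) (by decide))
        have c4 : PySem.Chars.startswith t ("web.archive.org".toList ++ '/' :: "web/".toList) = false :=
          Bool.eq_false_iff.mpr (fun hh =>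
            absurd (hg1.symm.trans ((hcond _ _ (by decide)).mp hh).1) (by decide))
        have c5 : PySem.Chars.startswith t ("en.wikipedia.org".toList ++ '/' :: "wiki/".toList) = false :=
          Bool.eq_false_iff.mpr (fun hh =>
            absurd (hg1.symm.trans ((hcond _ _ (by decide)).mp hh).1) (by decide))
        have c1 : PySem.Chars.startswith t ("gitlab.com".toList ++ '/' :: "".toList) = true :=
          (hcond _ _ (by decide)).mpr ⟨hg1, List.nil_prefix⟩
        rw [c1, c2, c3, c4, c5, hIv]
        rw [hIv] at hg1
        simp [hg1]
      · by_cases hg2 : t.take ((PySem.Chars.find t ['/']).toNat) = "github.com".toList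
        · have hIv : (PySem.Chars.find t ['/']).toNat = 10 := by
            have := halen
            rw [hg2] at this
            simpa using this.symm
          have c1 : PySem.Chars.startswith t ("gitlab.com".toList ++ '/' :: "".toList) = false :=
            Bool.eq_false_iff.mpr (fun hh =>
              absurd (hg2.symm.trans ((hcond _ _ (by decide)).mp hh).1) (by decide))
          have c3 : PySem.Chars.startswith t ("sourceforge.net".toList ++ '/' :: "projects/".toList) = false :=
            Bool.eq_false_iff.mpr (fun hh =>
              absurd (hg2.symm.trans ((hcond _ _ (by decide)).mp hh).1) (by decide))
          have c4 : PySem.Chars.startswith t ("web.archive.org".toList ++ '/' :: "web/".toList) = false :=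
            Bool.eq_false_iff.mpr (fun hh =>
              absurd (hg2.symm.trans ((hcond _ _ (by decide)).mp hh).1) (by decide))
          have c5 : PySem.Chars.startswith t ("en.wikipedia.org".toList ++ '/' :: "wiki/".toList) = false :=
            Bool.eq_false_iff.mpr (fun hh =>
              absurd (hg2.symm.trans ((hcond _ _ (by decide)).mp hh).1) (by decide))
          have c2 : PySem.Chars.startswith t ("github.com".toList ++ '/' :: "".toList) = true :=
            (hcond _ _ (by decide)).mpr ⟨hg2, List.nil_prefix⟩
          rw [c1, c2, c3, c4, c5, hIv]
          rw [hIv] at hg2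
          simp [hg2]
        · by_cases hg3 : t.take ((PySem.Chars.find t ['/']).toNat) = "sourceforge.net".toList
          · have hIv : (PySem.Chars.find t ['/']).toNat = 15 := by
              have := halen
              rw [hg3] at this
              simpa using this.symm
            have c1 : PySem.Chars.startswith t ("gitlab.com".toList ++ '/' :: "".toList) = false :=
              Bool.eq_false_iff.mpr (fun hh =>
                absurd (hg3.symm.trans ((hcond _ _ (by decide)).mp hh).1) (by decide))
            have c2 : PySem.Chars.startswith t ("github.com".toList ++ '/' :: "".toList) = false :=
              Bool.eq_false_iff.mpr (fun hh =>
                absurd (hg3.symm.trans ((hcond _ _ (by decide)).mp hh).1) (by decide))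
            have c4 : PySem.Chars.startswith t ("web.archive.org".toList ++ '/' :: "web/".toList) = false :=
              Bool.eq_false_iff.mpr (fun hh =>
                absurd (hg3.symm.trans ((hcond _ _ (by decide)).mp hh).1) (by decide))
            have c5 : PySem.Chars.startswith t ("en.wikipedia.org".toList ++ '/' :: "wiki/".toList) = false :=
              Bool.eq_false_iff.mpr (fun hh =>
                absurd (hg3.symm.trans ((hcond _ _ (by decide)).mp hh).1) (by decide))
            have c3 : PySem.Chars.startswith t ("sourceforge.net".toList ++ '/' :: "projects/".toList)
                = PySem.Chars.startswith (t.drop ((PySem.Chars.find t ['/']).toNat + 1)) "projects/".toList := by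
              by_cases hr : "projects/".toList <+: t.drop ((PySem.Chars.find t ['/']).toNat + 1)
              · rw [(hcond _ _ (by decide)).mpr ⟨hg3, hr⟩,
                    (PySem.Chars.startswith_iff _ _).mpr hr]
              · rw [Bool.eq_false_iff.mpr (fun hh => hr ((hcond _ _ (by decide)).mp hh).2),
                    Bool.eq_false_iff.mpr (fun hh => hr ((PySem.Chars.startswith_iff _ _).mp hh))]
            rw [c1, c2, c3, c4, c5, hIv]
            rw [hIv] at hg3
            simp [hg3, List.drop_drop]
          · by_cases hg4 : t.take ((PySem.Chars.find t ['/']).toNat) = "web.archive.org".toList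
            · have hIv : (PySem.Chars.find t ['/']).toNat = 15 := by
                have := halen
                rw [hg4] at this
                simpa using this.symm
              have c1 : PySem.Chars.startswith t ("gitlab.com".toList ++ '/' :: "".toList) = false :=
                Bool.eq_false_iff.mpr (fun hh =>
                  absurd (hg4.symm.trans ((hcond _ _ (by decide)).mp hh).1) (by decide))
              have c2 : PySem.Chars.startswith t ("github.com".toList ++ '/' :: "".toList) = false :=
                Bool.eq_false_iff.mpr (fun hh =>
                  absurd (hg4.symm.trans ((hcond _ _ (by decide)).mp hh).1) (by decide))
              have c3 : PySem.Chars.startswith t ("sourceforge.net".toList ++ '/' :: "projects/".toList) = false :=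
                Bool.eq_false_iff.mpr (fun hh =>
                  absurd (hg4.symm.trans ((hcond _ _ (by decide)).mp hh).1) (by decide))
              have c5 : PySem.Chars.startswith t ("en.wikipedia.org".toList ++ '/' :: "wiki/".toList) = false :=
                Bool.eq_false_iff.mpr (fun hh =>
                  absurd (hg4.symm.trans ((hcond _ _ (by decide)).mp hh).1) (by decide))
              have c4 : PySem.Chars.startswith t ("web.archive.org".toList ++ '/' :: "web/".toList)
                  = PySem.Chars.startswith (t.drop ((PySem.Chars.find t ['/']).toNat + 1)) "web/".toList := by
                by_cases hr : "web/".toList <+: t.drop ((PySem.Chars.find t ['/']).toNat + 1)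
                · rw [(hcond _ _ (by decide)).mpr ⟨hg4, hr⟩,
                      (PySem.Chars.startswith_iff _ _).mpr hr]
                · rw [Bool.eq_false_iff.mpr (fun hh => hr ((hcond _ _ (by decide)).mp hh).2),
                      Bool.eq_false_iff.mpr (fun hh => hr ((PySem.Chars.startswith_iff _ _).mp hh))]
              rw [c1, c2, c3, c4, c5, hIv]
              rw [hIv] at hg4
              simp [hg4, List.drop_drop]
            · by_cases hg5 : t.take ((PySem.Chars.find t ['/']).toNat) = "en.wikipedia.org".toList
              · have hIv : (PySem.Chars.find t ['/']).toNat = 16 := by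
                  have := halen
                  rw [hg5] at this
                  simpa using this.symm
                have c1 : PySem.Chars.startswith t ("gitlab.com".toList ++ '/' :: "".toList) = false :=
                  Bool.eq_false_iff.mpr (fun hh =>
                    absurd (hg5.symm.trans ((hcond _ _ (by decide)).mp hh).1) (by decide))
                have c2 : PySem.Chars.startswith t ("github.com".toList ++ '/' :: "".toList) = false :=
                  Bool.eq_false_iff.mpr (fun hh =>
                    absurd (hg5.symm.trans ((hcond _ _ (by decide)).mp hh).1) (by decide))
                have c3 : PySem.Chars.startswith t ("sourceforge.net".toList ++ '/' :: "projects/".toList) = false :=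
                  Bool.eq_false_iff.mpr (fun hh =>
                    absurd (hg5.symm.trans ((hcond _ _ (by decide)).mp hh).1) (by decide))
                have c4 : PySem.Chars.startswith t ("web.archive.org".toList ++ '/' :: "web/".toList) = false :=
                  Bool.eq_false_iff.mpr (fun hh =>
                    absurd (hg5.symm.trans ((hcond _ _ (by decide)).mp hh).1) (by decide))
                have c5 : PySem.Chars.startswith t ("en.wikipedia.org".toList ++ '/' :: "wiki/".toList)
                    = PySem.Chars.startswith (t.drop ((PySem.Chars.find t ['/']).toNat + 1)) "wiki/".toList := by
                  by_cases hr : "wiki/".toList <+: t.drop ((PySem.Chars.find t ['/']).toNat + 1)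
                  · rw [(hcond _ _ (by decide)).mpr ⟨hg5, hr⟩,
                        (PySem.Chars.startswith_iff _ _).mpr hr]
                  · rw [Bool.eq_false_iff.mpr (fun hh => hr ((hcond _ _ (by decide)).mp hh).2),
                        Bool.eq_false_iff.mpr (fun hh => hr ((PySem.Chars.startswith_iff _ _).mp hh))]
                rw [c1, c2, c3, c4, c5, hIv]
                rw [hIv] at hg5
                simp [hg5, List.drop_drop]
              · have c1 : PySem.Chars.startswith t ("gitlab.com".toList ++ '/' :: "".toList) = false :=
                  Bool.eq_false_iff.mpr (fun hh => hg1 ((hcond _ _ (by decide)).mp hh).1)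
                have c2 : PySem.Chars.startswith t ("github.com".toList ++ '/' :: "".toList) = false :=
                  Bool.eq_false_iff.mpr (fun hh => hg2 ((hcond _ _ (by decide)).mp hh).1)
                have c3 : PySem.Chars.startswith t ("sourceforge.net".toList ++ '/' :: "projects/".toList) = false :=
                  Bool.eq_false_iff.mpr (fun hh => hg3 ((hcond _ _ (by decide)).mp hh).1)
                have c4 : PySem.Chars.startswith t ("web.archive.org".toList ++ '/' :: "web/".toList) = false :=
                  Bool.eq_false_iff.mpr (fun hh => hg4 ((hcond _ _ (by decide)).mp hh).1)
                have c5 : PySem.Chars.startswith t ("en.wikipedia.org".toList ++ '/' :: "wiki/".toList) = false :=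
                  Bool.eq_false_iff.mpr (fun hh => hg5 ((hcond _ _ (by decide)).mp hh).1)
                rw [c1, c2, c3, c4, c5]
                rw [if_neg hg1, if_neg hg2, if_neg hg3, if_neg hg4, if_neg hg5]
                simp
  · have hf : ∀ q : List Char, "https://".toList <+: q →
        PySem.Chars.startswith u q = false := by
      intro q hq
      exact Bool.eq_false_iff.mpr (fun hh =>
        hs ((PySem.Chars.startswith_iff _ _).mpr (hq.trans ((PySem.Chars.startswith_iff _ _).mp hh))))
    simp only [aList, bList]
    rw [hf "https://gitlab.com/".toList (by decide), hf "https://github.com/".toList (by decide),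
        hf "https://sourceforge.net/projects/".toList (by decide),
        hf "https://web.archive.org/web/".toList (by decide),
        hf "https://en.wikipedia.org/wiki/".toList (by decide),
        Bool.eq_false_iff.mpr hs]
    simp

-- ===== VERDICT =====
theorem shortcut_url_spec : Claim_equal_shortcut_url := by
  intro url _
  unfold Spec_shortcut_url
  exact String.toList_inj.mp ((aEq url).trans ((listEq url.toList).trans (bEq url).symm))
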